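-- pv_equiv track=rewrite | github.com/ayush51/DSA | python/arrays&hashing/numberofsentences.py | noofsentences
-- ===== SOURCE A (Python) =====
-- def noofsentences(wordSet,sentence):
--     hashmap = {}
--
--     for w in wordSet:
--         word = tuple(sorted(w))
--         hashmap[word] = hashmap.get(word,0) + 1
--     result = [1] * len(sentence)
--     for i in range(len(sentence)):
--         for w in sentence[i].split():
--             key = tuple(sorted(w))
--             if key in hashmap:
--                 result[i] *= hashmap[key]
--     return result
-- ===== SOURCE B (Python) =====
-- def noofsentences(wordSet, sentence):
--     # Sort the anagram keys once; per query, count duplicates as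
--     # bisect_right - bisect_left on the sorted key list (binary search).
--     keys = sorted(''.join(sorted(w)) for w in wordSet)
--     result = []
--     for s in sentence:
--         prod = 1
--         for w in s.split():
--             k = ''.join(sorted(w))
--             lo, hi = 0, len(keys)
--             while lo < hi:  # bisect_left
--                 mid = (lo + hi) // 2
--                 if keys[mid] < k:
--                     lo = mid + 1
--                 else:
--                     hi = mid
--             left = lo
--             lo, hi = left, len(keys)
--             while lo < hi:  # bisect_right
--                 mid = (lo + hi) // 2
--                 if k < keys[mid]:
--                     hi = mid
--                 else:
--                     lo = mid + 1
--             if left < lo: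
--                 prod *= lo - left
--         result.append(prod)
--     return result
-- ===== Notes on version B (the rewrite author's own statement) =====
-- stated objective: alternative
-- what changed: Replaces A's hash-counter of anagram keys by a sorted key list queried with hand-rolled binary searches: the anagram count of each sentence word is bisect_right minus bisect_left on the sorted list, multiplied in only when positive.
import Mathlib
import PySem

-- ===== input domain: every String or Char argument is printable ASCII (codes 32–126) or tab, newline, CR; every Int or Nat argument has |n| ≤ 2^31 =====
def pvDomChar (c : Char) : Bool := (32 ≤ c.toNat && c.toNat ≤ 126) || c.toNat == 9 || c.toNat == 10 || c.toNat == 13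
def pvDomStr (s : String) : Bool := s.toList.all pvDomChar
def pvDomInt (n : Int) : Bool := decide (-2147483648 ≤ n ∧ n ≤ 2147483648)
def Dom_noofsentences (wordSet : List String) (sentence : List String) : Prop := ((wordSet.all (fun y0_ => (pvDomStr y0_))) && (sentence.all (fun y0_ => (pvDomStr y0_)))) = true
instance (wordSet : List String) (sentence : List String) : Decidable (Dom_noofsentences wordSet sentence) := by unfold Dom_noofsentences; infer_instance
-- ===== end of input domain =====

-- B replaces A's hash counter of anagram keys by a sorted key list queried with
-- two hand-rolled binary searches (count = bisect_right - bisect_left): alternative algorithm.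

-- ===== PORT A =====
-- tuple(sorted(w)) / ''.join(sorted(w)): the sorted character list of a word (a subexpression of both Pythons)
def pvKey (w : String) : List Char := PySem.List.sorted w.toList (fun x => x) false

-- A's first loop: hashmap[tuple(sorted(w))] = hashmap.get(word,0) + 1
def pvHashmap (wordSet : List String) : PySem.Dict (List Char) Int :=
  wordSet.foldl (fun d w => d.insert (pvKey w) (d.getD (pvKey w) 0 + 1)) PySem.Dict.empty

def noofsentences (wordSet : List String) (sentence : List String) : List Int :=
  sentence.map (fun s =>
    (PySem.Str.split₀ s).foldl (fun r w =>
      if (pvHashmap wordSet).contains (pvKey w) then r * (pvHashmap wordSet).getD (pvKey w) 0 else r) 1)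

-- ===== PORT B =====
-- Source B's bisect_left loop (while lo < hi: mid=(lo+hi)//2; ...).  lo, hi are nonnegative
-- Python ints, so Nat with Nat division is exact; keys[mid] is always in range
-- (mid < hi ≤ len), so getD is exact there.
def pvBsLeft (u : List (List Char)) (k : List Char) (lo hi : Nat) : Nat :=
  if _h : lo < hi then
    let mid := (lo + hi) / 2
    if u.getD mid [] < k then pvBsLeft u k (mid + 1) hi else pvBsLeft u k lo mid
  else lo
termination_by hi - lo
decreasing_by all_goals omega

-- Source B's bisect_right loop
def pvBsRight (u : List (List Char)) (k : List Char) (lo hi : Nat) : Nat :=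
  if _h : lo < hi then
    let mid := (lo + hi) / 2
    if k < u.getD mid [] then pvBsRight u k lo mid else pvBsRight u k (mid + 1) hi
  else lo
termination_by hi - lo
decreasing_by all_goals omega

def noofsentences_alt (wordSet : List String) (sentence : List String) : List Int :=
  let keys := PySem.List.sorted (wordSet.map (fun w => pvKey w)) (fun x => x) false
  sentence.map (fun s =>
    (PySem.Str.split₀ s).foldl (fun prod w =>
      let k := pvKey w
      let left := pvBsLeft keys k 0 keys.length
      let lo := pvBsRight keys k left keys.length
      if left < lo then prod * ((lo - left : Nat) : Int) else prod) 1)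

-- ===== PRECONDITION & SPEC =====
def Spec_noofsentences (wordSet : List String) (sentence : List String) (out : List Int) : Prop := out = noofsentences_alt wordSet sentence
instance (wordSet : List String) (sentence : List String) (out : List Int) : Decidable (Spec_noofsentences wordSet sentence out) := by unfold Spec_noofsentences; infer_instance

-- ===== CLAIM =====
def Claim_equal_noofsentences : Prop := ∀ (wordSet : List String) (sentence : List String), Dom_noofsentences wordSet sentence → Spec_noofsentences wordSet sentence (noofsentences wordSet sentence)

-- ===== LEMMAS AND PROOFS =====
theorem pvBsLeft_spec (u : List (List Char)) (k : List Char)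
    (hs : u.Pairwise (· ≤ ·)) (lo hi : Nat) (hhi : hi ≤ u.length) (hlo : lo ≤ hi)
    (hL : ∀ j (_ : j < u.length), j < lo → u[j] < k)
    (hR : ∀ j (_ : j < u.length), hi ≤ j → k ≤ u[j]) :
    pvBsLeft u k lo hi ≤ u.length ∧
      (∀ j (_ : j < u.length), j < pvBsLeft u k lo hi → u[j] < k) ∧
      (∀ j (_ : j < u.length), pvBsLeft u k lo hi ≤ j → k ≤ u[j]) := by
  rw [List.pairwise_iff_getElem] at hs
  revert hhi hlo hL hR
  induction lo, hi using pvBsLeft.induct (u := u) (k := k) with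
  | case1 lo hi h mid hlt ih =>
    intro hhi hlo hL hR
    have hm : mid < u.length := by omega
    rw [pvBsLeft, dif_pos h, if_pos hlt]
    refine ih (by omega) (by omega) ?_ hR
    intro j hj hjm
    rcases Nat.lt_or_ge j mid with hj' | hj'
    · exact lt_of_le_of_lt (hs j mid hj hm hj') (by rwa [List.getD_eq_getElem u [] hm] at hlt)
    · have : j = mid := by omega
      subst this
      rwa [List.getD_eq_getElem u [] hm] at hlt
  | case2 lo hi h mid hlt ih =>
    intro hhi hlo hL hR
    have hm : mid < u.length := by omega
    have hk : k ≤ u[mid] := not_lt.mp (by rwa [List.getD_eq_getElem u [] hm] at hlt)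
    rw [pvBsLeft, dif_pos h, if_neg hlt]
    refine ih (by omega) (by omega) hL ?_
    intro j hj hjm
    rcases Nat.lt_or_ge mid j with hj' | hj'
    · exact le_trans hk (hs mid j hm hj hj')
    · have : j = mid := by omega
      subst this; exact hk
  | case3 lo hi h =>
    intro hhi hlo hL hR
    rw [pvBsLeft, dif_neg h]
    have : lo = hi := by omega
    subst this
    exact ⟨by omega, hL, hR⟩

theorem pvBsRight_spec (u : List (List Char)) (k : List Char)
    (hs : u.Pairwise (· ≤ ·)) (lo hi : Nat) (hhi : hi ≤ u.length) (hlo : lo ≤ hi)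
    (hL : ∀ j (_ : j < u.length), j < lo → u[j] ≤ k)
    (hR : ∀ j (_ : j < u.length), hi ≤ j → k < u[j]) :
    pvBsRight u k lo hi ≤ u.length ∧
      (∀ j (_ : j < u.length), j < pvBsRight u k lo hi → u[j] ≤ k) ∧
      (∀ j (_ : j < u.length), pvBsRight u k lo hi ≤ j → k < u[j]) := by
  rw [List.pairwise_iff_getElem] at hs
  revert hhi hlo hL hR
  induction lo, hi using pvBsRight.induct (u := u) (k := k) with
  | case1 lo hi h mid hlt ih =>
    intro hhi hlo hL hR
    have hm : mid < u.length := by omega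
    have hk : k < u[mid] := by rwa [List.getD_eq_getElem u [] hm] at hlt
    rw [pvBsRight, dif_pos h, if_pos hlt]
    refine ih (by omega) (by omega) hL ?_
    intro j hj hjm
    rcases Nat.lt_or_ge mid j with hj' | hj'
    · exact lt_of_lt_of_le hk (hs mid j hm hj hj')
    · have : j = mid := by omega
      subst this; exact hk
  | case2 lo hi h mid hlt ih =>
    intro hhi hlo hL hR
    have hm : mid < u.length := by omega
    have hk : u[mid] ≤ k := not_lt.mp (by rwa [List.getD_eq_getElem u [] hm] at hlt)
    rw [pvBsRight, dif_pos h, if_neg hlt]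
    refine ih (by omega) (by omega) ?_ hR
    intro j hj hjm
    rcases Nat.lt_or_ge j mid with hj' | hj'
    · exact le_trans (hs j mid hj hm hj') hk
    · have : j = mid := by omega
      subst this; exact hk
  | case3 lo hi h =>
    intro hhi hlo hL hR
    rw [pvBsRight, dif_neg h]
    have : lo = hi := by omega
    subst this
    exact ⟨by omega, hL, hR⟩

theorem pvCount_bracket (u : List (List Char)) (k : List Char) (hs : u.Pairwise (· ≤ ·)) :
    pvBsLeft u k 0 u.length ≤ pvBsRight u k (pvBsLeft u k 0 u.length) u.length ∧
      pvBsRight u k (pvBsLeft u k 0 u.length) u.length - pvBsLeft u k 0 u.length = u.count k := by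
  obtain ⟨haL, haLlt, haLge⟩ := pvBsLeft_spec u k hs 0 u.length le_rfl (Nat.zero_le _)
    (fun j hj hj0 => absurd hj0 (Nat.not_lt_zero j)) (fun j hj hjl => absurd hjl (by omega))
  set a := pvBsLeft u k 0 u.length with ha
  obtain ⟨hbL, hbLle, hbGt⟩ := pvBsRight_spec u k hs a u.length le_rfl haL
    (fun j hj hja => le_of_lt (haLlt j hj hja)) (fun j hj hjl => absurd hjl (by omega))
  set b := pvBsRight u k a u.length with hb
  have hab : a ≤ b := by
    by_contra hc
    have hbl : b < u.length := by omega
    exact absurd (hbGt b hbl le_rfl) (not_lt.mpr (le_of_lt (haLlt b hbl (by omega))))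
  refine ⟨hab, ?_⟩
  have hsplit1 : u = u.take b ++ u.drop b := (List.take_append_drop b u).symm
  have hsplit2 : u.take b = u.take a ++ (u.take b).drop a := by
    conv_lhs => rw [← List.take_append_drop a (u.take b)]
    rw [List.take_take, min_eq_left hab]
  have hmidlen : ((u.take b).drop a).length = b - a := by simp [Nat.min_eq_left hbL]
  have hc1 : (u.take a).count k = 0 := by
    rw [List.count_eq_zero]
    intro hmem
    obtain ⟨i, hi, hik⟩ := List.mem_iff_getElem.mp hmem
    rw [List.getElem_take] at hik
    have hi' : i < a := by simp at hi; omega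
    exact ne_of_lt (haLlt i (by omega) hi') hik
  have hc3 : (u.drop b).count k = 0 := by
    rw [List.count_eq_zero]
    intro hmem
    obtain ⟨i, hi, hik⟩ := List.mem_iff_getElem.mp hmem
    rw [List.getElem_drop] at hik
    have hi' : b + i < u.length := by simp at hi; omega
    exact ne_of_gt (hbGt (b + i) hi' (by omega)) hik
  have hc2 : ((u.take b).drop a).count k = b - a := by
    rw [← hmidlen]
    rw [List.count_eq_length]
    intro x hx
    obtain ⟨i, hi, hik⟩ := List.mem_iff_getElem.mp hx
    rw [List.getElem_drop, List.getElem_take] at hik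
    have hi' : a + i < b := by
      have := hi; rw [hmidlen] at this; omega
    have hlen : a + i < u.length := by omega
    have h1 : k ≤ u[a + i] := haLge (a + i) hlen (by omega)
    have h2 : u[a + i] ≤ k := hbLle (a + i) hlen hi'
    rw [← hik]
    exact le_antisymm h1 h2
  calc b - a = (u.take a).count k + (((u.take b).drop a).count k + (u.drop b).count k) := by
        rw [hc1, hc2, hc3]; omega
    _ = u.count k := by
        conv_rhs => rw [hsplit1, hsplit2]
        simp [List.count_append]

theorem pvHashmap_eq (ws : List String) : pvHashmap ws = PySem.Dict.counter (ws.map pvKey) := by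
  rw [← PySem.Dict.foldl_insert_getD_add_one_eq_counter, List.foldl_map]
  rfl

theorem pvStep_eq (ws : List String) (r : Int) (w : String) :
    (if (pvHashmap ws).contains (pvKey w) then r * (pvHashmap ws).getD (pvKey w) 0 else r)
      = (let keys := PySem.List.sorted (ws.map (fun w => pvKey w)) (fun x => x) false
         let k := pvKey w
         let left := pvBsLeft keys k 0 keys.length
         let lo := pvBsRight keys k left keys.length
         if left < lo then r * ((lo - left : Nat) : Int) else r) := by
  simp only []
  set keys := PySem.List.sorted (ws.map (fun w => pvKey w)) (fun x => x) false with hkeys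
  have hsorted : keys.Pairwise (· ≤ ·) := by
    have h := PySem.List.sorted_pairwise (ws.map (fun w => pvKey w)) (fun x => x)
    convert h using 2
  obtain ⟨hab, hcnt⟩ := pvCount_bracket keys (pvKey w) hsorted
  have hperm : keys.Perm (ws.map (fun w => pvKey w)) := by
    have h := PySem.List.sorted_perm (ws.map (fun w => pvKey w)) (fun x : List Char => x) false
    convert h using 2
  have hc : keys.count (pvKey w) = (ws.map pvKey).count (pvKey w) := hperm.count_eq _
  rw [pvHashmap_eq, PySem.Dict.contains_counter, PySem.Dict.getD_counter]
  by_cases hmem : pvKey w ∈ ws.map pvKey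
  · have hpos : 0 < (ws.map pvKey).count (pvKey w) := List.count_pos_iff.mpr hmem
    rw [if_pos (by simp [List.contains_eq_mem, hmem]), if_pos (by omega), hcnt, hc]
  · have hzero : (ws.map pvKey).count (pvKey w) = 0 := List.count_eq_zero.mpr hmem
    rw [if_neg (by simp [List.contains_eq_mem, hmem]), if_neg (by omega)]

-- ===== VERDICT =====
theorem noofsentences_spec : Claim_equal_noofsentences := by
  intro ws sen _
  unfold Spec_noofsentences noofsentences noofsentences_alt
  refine List.map_congr_left (fun s _ => ?_)
  congr 1
  funext r w
  exact pvStep_eq ws r w
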